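-- pv_equiv track=rewrite | github.com/sarthaknimbalkar/Auto-Code-Formatter-Python | website/form2.py | format_special_syntax_rules
-- ===== SOURCE A (Python) =====
-- def format_special_syntax_rules(code_content):
--     lines = code_content.split('\n')
--     formatted_code = []
--
--     for line in lines:
--         if line.strip().startswith('@'):  # Check for lines starting with '@'
--             formatted_code.append('\n' + line)  # Add a newline before the line
--         else:
--             formatted_code.append(line)
--
--     return '\n'.join(formatted_code)
-- ===== SOURCE B (Python) =====
-- def format_special_syntax_rules(code_content):
--     # Single character-level scan (state machine): while in the leading-whitespace
--     # region of a line, buffer the whitespace; on the first non-space character,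
--     # emit a newline first if it is '@'. No split/join, no list of lines.
--     out = []
--     ws = []        # buffered leading whitespace of the current line
--     past = False   # True once past the leading-whitespace region of the line
--     for ch in code_content:
--         if ch == '\n':
--             out.extend(ws)
--             ws = []
--             out.append(ch)
--             past = False
--         elif not past:
--             if ch in ' \t\r\f\v':
--                 ws.append(ch)
--             else:
--                 if ch == '@':
--                     out.append('\n')
--                 out.extend(ws)
--                 ws = []
--                 out.append(ch)
--                 past = True
--         else:
--             out.append(ch)
--     out.extend(ws)
--     return ''.join(out)
-- ===== Notes on version B (the rewrite author's own statement) =====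
-- stated objective: alternative
-- what changed: A splits the text into a list of lines, tests each line's strip() and rejoins; B makes a single character-level state-machine pass that buffers each line's leading whitespace and emits a newline when the first non-whitespace character of a line is '@', building no line list and doing no join.
import Mathlib
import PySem

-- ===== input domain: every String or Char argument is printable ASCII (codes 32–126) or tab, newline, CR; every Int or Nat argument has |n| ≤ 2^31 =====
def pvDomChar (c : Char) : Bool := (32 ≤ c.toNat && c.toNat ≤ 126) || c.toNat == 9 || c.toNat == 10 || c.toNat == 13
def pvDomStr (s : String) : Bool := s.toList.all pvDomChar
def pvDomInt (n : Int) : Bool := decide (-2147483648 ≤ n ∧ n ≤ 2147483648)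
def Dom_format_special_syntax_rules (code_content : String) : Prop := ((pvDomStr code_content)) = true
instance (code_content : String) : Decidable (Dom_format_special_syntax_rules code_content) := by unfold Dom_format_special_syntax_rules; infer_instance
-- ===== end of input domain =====

-- B replaces A's split-into-lines / per-line test / rejoin with a single character-level
-- state-machine scan that buffers each line's leading whitespace (objective: alternative).

-- ===== PORT A =====
-- A: split on '\n', append '\n'+line for each line whose strip() starts with '@', join back.
def format_special_syntax_rules (code_content : String) : String :=
  let lines := PySem.Chars.splitOn code_content.toList ['\n']
  let formatted_code := lines.foldl (fun acc line =>
    acc ++ [if PySem.Chars.startswith (PySem.Chars.strip line) ['@'] then '\n' :: line else line]) []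
  String.ofList (PySem.Chars.join ['\n'] formatted_code)

-- ===== PORT B =====
-- Source B's membership test  ch in ' \t\r\f\v'
def pvWsNoNl (c : Char) : Bool := c == ' ' || c == '\t' || c == '\r' || c == '\x0c' || c == '\x0b'

-- Source B's loop body: state = (emitted output, buffered leading whitespace of the
-- current line, past-the-leading-whitespace flag)
def pvStep (s : List Char × List Char × Bool) (ch : Char) : List Char × List Char × Bool :=
  if ch = '\n' then (s.1 ++ s.2.1 ++ [ch], [], false)
  else if s.2.2 = false then
    if pvWsNoNl ch then (s.1, s.2.1 ++ [ch], false)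
    else ((if ch = '@' then s.1 ++ ['\n'] else s.1) ++ s.2.1 ++ [ch], [], true)
  else (s.1 ++ [ch], s.2.1, s.2.2)

-- B: one fold of pvStep over the characters, then flush the pending whitespace.
def format_special_syntax_rules_alt (code_content : String) : String :=
  let st := code_content.toList.foldl pvStep ([], [], false)
  String.ofList (st.1 ++ st.2.1)

-- ===== PRECONDITION & SPEC =====
def Spec_format_special_syntax_rules (code_content : String) (out : String) : Prop := out = format_special_syntax_rules_alt code_content
instance (code_content : String) (out : String) : Decidable (Spec_format_special_syntax_rules code_content out) := by unfold Spec_format_special_syntax_rules; infer_instance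

-- ===== CLAIM (what is proved, stated in full; the proofs are below) =====
def Claim_equal_format_special_syntax_rules : Prop := ∀ (code_content : String), Dom_format_special_syntax_rules code_content → Spec_format_special_syntax_rules code_content (format_special_syntax_rules code_content)

-- ===== LEMMAS AND PROOFS =====

-- Proof-side spec of Python's  s.split('\n')  as a structural recursion (cur = reversed current piece).
def pvLines1 : List Char → List Char → List (List Char)
  | [], cur => [cur.reverse]
  | c :: rest, cur => if c = '\n' then cur.reverse :: pvLines1 rest [] else pvLines1 rest (c :: cur)

-- Proof-side spec of B's machine: the output still to be emitted from state (ws, past).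
def pvTailOut : List Char → List Char → Bool → List Char
  | [], ws, _ => ws
  | c :: rest, ws, past =>
    if c = '\n' then ws ++ '\n' :: pvTailOut rest [] false
    else if past = false then
      if pvWsNoNl c then pvTailOut rest (ws ++ [c]) false
      else (if c = '@' then ['\n'] else []) ++ ws ++ c :: pvTailOut rest [] true
    else c :: pvTailOut rest ws past

-- A's per-line transform.
def pvF (line : List Char) : List Char :=
  if PySem.Chars.startswith (PySem.Chars.strip line) ['@'] then '\n' :: line else line

theorem pv_char_eq_iff (c d : Char) : (c = d) ↔ c.toNat = d.toNat :=
  ⟨fun h => h ▸ rfl, fun h => Char.ext (UInt32.toNat_inj.mp h)⟩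

theorem pv_go_nil (fuel : Nat) (cur : List Char) (acc : List (List Char)) :
    PySem.Chars.splitOn.go ['\n'] fuel [] cur acc = (cur.reverse :: acc).reverse := by
  cases fuel <;> (rw [PySem.Chars.splitOn.go]; simp)

theorem pv_go_nl (fuel : Nat) (rest cur : List Char) (acc : List (List Char)) :
    PySem.Chars.splitOn.go ['\n'] (fuel+1) ('\n'::rest) cur acc
      = PySem.Chars.splitOn.go ['\n'] fuel rest [] (cur.reverse :: acc) := by
  rw [PySem.Chars.splitOn.go]; simp [List.isPrefixOf]

theorem pv_go_cons (fuel : Nat) (c : Char) (rest cur : List Char) (acc : List (List Char))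
    (h : c ≠ '\n') :
    PySem.Chars.splitOn.go ['\n'] (fuel+1) (c::rest) cur acc
      = PySem.Chars.splitOn.go ['\n'] fuel rest (c::cur) acc := by
  rw [PySem.Chars.splitOn.go]; simp [List.isPrefixOf, Ne.symm h]

theorem pv_go_eq_lines1 (l : List Char) : ∀ (fuel : Nat) (cur : List Char) (acc : List (List Char)),
    l.length ≤ fuel →
    PySem.Chars.splitOn.go ['\n'] fuel l cur acc = acc.reverse ++ pvLines1 l cur := by
  induction l with
  | nil => intro fuel cur acc _; simp [pv_go_nil, pvLines1]
  | cons c rest ih =>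
    intro fuel cur acc hf
    obtain ⟨f, rfl⟩ : ∃ f, fuel = f + 1 := ⟨fuel - 1, by simp at hf; omega⟩
    by_cases hc : c = '\n'
    · subst hc
      rw [pv_go_nl, ih f [] _ (by simp at hf; omega)]
      simp [pvLines1]
    · rw [pv_go_cons _ _ _ _ _ hc, ih f (c::cur) _ (by simp at hf; omega)]
      simp [pvLines1, hc]

theorem pv_splitOn_eq_lines1 (l : List Char) :
    PySem.Chars.splitOn l ['\n'] = pvLines1 l [] := by
  rw [PySem.Chars.splitOn, pv_go_eq_lines1 l (l.length + 1) [] [] (by omega)]; rfl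

theorem pvLines1_ne_nil (l cur : List Char) : pvLines1 l cur ≠ [] := by
  induction l generalizing cur with
  | nil => simp [pvLines1]
  | cons c rest ih => by_cases hc : c = '\n' <;> simp [pvLines1, hc, ih]

-- the accumulated prefix cur just prepends (reversed) to the first piece
theorem pvLines1_shift (l : List Char) : ∀ cur : List Char,
    pvLines1 l cur = (cur.reverse ++ (pvLines1 l []).headI) :: (pvLines1 l []).tail := by
  induction l with
  | nil => intro cur; simp [pvLines1]
  | cons c rest ih =>
    intro cur
    by_cases hc : c = '\n'
    · simp [pvLines1, hc]
    · simp only [pvLines1, if_neg hc]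
      rw [ih (c :: cur), ih [c]]
      simp

theorem pv_join_cons (sep a : List Char) (L : List (List Char)) :
    PySem.Chars.join sep (a :: L) = a ++ (L.map (fun x => sep ++ x)).flatten := by
  induction L generalizing a with
  | nil => simp [PySem.Chars.join, List.intercalate]
  | cons h t ih =>
    have := ih h
    simp only [PySem.Chars.join, List.intercalate] at *
    simp [List.intersperse, this]

theorem pv_flatten_sep (M : List (List Char)) (h : M ≠ []) :
    (M.map (fun x => ['\n'] ++ x)).flatten = '\n' :: PySem.Chars.join ['\n'] M := by
  cases M with
  | nil => exact absurd rfl h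
  | cons m t => rw [pv_join_cons]; simp

-- pvWsNoNl characters are Python whitespace
theorem pvWsNoNl_isspace {c : Char} (h : pvWsNoNl c = true) : PySem.Chars.isspace c = true := by
  simp [pvWsNoNl] at h
  rcases h with ((((h|h)|h)|h)|h) <;> subst h <;> rfl

-- inside the ASCII domain, off a newline, pvWsNoNl agrees with Python whitespace
theorem pv_ws_iff {c : Char} (hdom : pvDomChar c = true) (hnl : c ≠ '\n') :
    pvWsNoNl c = PySem.Chars.isspace c := by
  have h10 : c.toNat ≠ 10 := fun h => hnl ((pv_char_eq_iff c '\n').mpr h)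
  simp [pvDomChar] at hdom
  rw [Bool.eq_iff_iff]
  simp [pvWsNoNl, PySem.Chars.isspace, pv_char_eq_iff]
  omega

theorem pv_f_ws {line : List Char} (h : ∀ c ∈ line, PySem.Chars.isspace c = true) :
    pvF line = line := by
  have h1 : PySem.Chars.lstrip line = [] := by
    rw [PySem.Chars.lstrip, List.dropWhile_eq_nil_iff]; exact h
  simp [pvF, PySem.Chars.strip, h1, PySem.Chars.rstrip, PySem.Chars.startswith]

theorem pv_f_head {ws : List Char} {c : Char} {r : List Char}
    (hws : ∀ d ∈ ws, PySem.Chars.isspace d = true) (hc : PySem.Chars.isspace c = false) :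
    pvF (ws ++ c :: r) = (if c = '@' then ['\n'] else []) ++ ws ++ c :: r := by
  have h0 : List.dropWhile PySem.Chars.isspace ws = [] := by
    rw [List.dropWhile_eq_nil_iff]; exact hws
  have h1 : PySem.Chars.lstrip (ws ++ c :: r) = c :: r := by
    simp [PySem.Chars.lstrip, List.dropWhile_append, h0, hc]
  have h2 : PySem.Chars.strip (ws ++ c :: r) = c :: (List.dropWhile PySem.Chars.isspace r.reverse).reverse := by
    rw [PySem.Chars.strip, h1, PySem.Chars.rstrip]
    simp only [List.reverse_cons, List.dropWhile_append]
    by_cases he : (List.dropWhile PySem.Chars.isspace r.reverse).isEmpty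
    · simp only [he, if_pos, List.dropWhile_cons, hc]
      simp only [List.isEmpty_iff] at he
      simp [he, hc]
    · simp [he]
  rw [pvF, h2]
  simp only [PySem.Chars.startswith, List.isPrefixOf, Bool.and_true]
  by_cases hat : c = '@'
  · simp [hat]
  · simp [hat, Ne.symm hat]

theorem pv_machine_eq_tailOut (l : List Char) : ∀ (out ws : List Char) (past : Bool),
    (l.foldl pvStep (out, ws, past)).1 ++ (l.foldl pvStep (out, ws, past)).2.1
      = out ++ pvTailOut l ws past := by
  induction l with
  | nil => intro out ws past; simp [pvTailOut]
  | cons c rest ih =>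
    intro out ws past
    simp only [List.foldl_cons]
    by_cases hnl : c = '\n'
    · rw [show pvStep (out, ws, past) c = (out ++ ws ++ [c], [], false) by simp [pvStep, hnl]]
      rw [ih]; simp [pvTailOut, hnl]
    · by_cases hp : past = false
      · by_cases hws : pvWsNoNl c
        · rw [show pvStep (out, ws, past) c = (out, ws ++ [c], false) by simp [pvStep, hnl, hp, hws]]
          rw [ih]; simp [pvTailOut, hnl, hp, hws]
        · rw [show pvStep (out, ws, past) c
              = ((if c = '@' then out ++ ['\n'] else out) ++ ws ++ [c], [], true) by
            simp [pvStep, hnl, hp, hws]]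
          rw [ih]
          by_cases hat : c = '@' <;>
            simp [pvTailOut, hnl, hp, hws, hat, show pvWsNoNl '@' = false from rfl]
      · simp only [Bool.not_eq_false] at hp
        rw [show pvStep (out, ws, past) c = (out ++ [c], ws, past) by simp [pvStep, hnl, hp]]
        rw [ih]; simp [pvTailOut, hnl, hp]

theorem pv_main (l : List Char) :
    ((∀ c ∈ l, pvDomChar c = true) → ∀ ws : List Char, (∀ c ∈ ws, pvWsNoNl c = true) →
      pvTailOut l ws false = PySem.Chars.join ['\n'] ((pvLines1 l ws.reverse).map pvF))
    ∧ ((∀ c ∈ l, pvDomChar c = true) →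
      pvTailOut l [] true
        = (pvLines1 l []).headI
          ++ (((pvLines1 l []).tail.map pvF).map (fun x => ['\n'] ++ x)).flatten) := by
  induction l with
  | nil =>
    constructor
    · intro _ ws hws
      have hf : pvF ws = ws := pv_f_ws (fun c hc => pvWsNoNl_isspace (hws c hc))
      simp [pvTailOut, pvLines1, pv_join_cons, hf]
    · intro _; simp [pvTailOut, pvLines1]
  | cons c rest ih =>
    constructor
    · intro hdom ws hws
      have hdr : ∀ x ∈ rest, pvDomChar x = true := fun x hx => hdom x (List.mem_cons_of_mem _ hx)
      by_cases hnl : c = '\n'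
      · subst hnl
        have hf : pvF ws = ws := pv_f_ws (fun d hd => pvWsNoNl_isspace (hws d hd))
        rw [show pvTailOut ('\n'::rest) ws false = ws ++ '\n' :: pvTailOut rest [] false from by
              simp [pvTailOut]]
        rw [ih.1 hdr [] (by simp)]
        rw [show pvLines1 ('\n'::rest) ws.reverse = ws :: pvLines1 rest [] from by simp [pvLines1]]
        rw [List.map_cons, hf, pv_join_cons, pv_flatten_sep _ (by simp [pvLines1_ne_nil])]
        simp
      · by_cases hwsc : pvWsNoNl c
        · rw [show pvTailOut (c::rest) ws false = pvTailOut rest (ws ++ [c]) false from by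
                simp [pvTailOut, hnl, hwsc]]
          rw [ih.1 hdr (ws ++ [c]) (by
            intro d hd; rcases List.mem_append.mp hd with h | h
            · exact hws d h
            · simp at h; subst h; exact hwsc)]
          simp [pvLines1, hnl]
        · have hisp : PySem.Chars.isspace c = false := by
            rw [← pv_ws_iff (hdom c (by simp)) hnl]
            simpa using hwsc
          rw [show pvTailOut (c::rest) ws false
                = (if c = '@' then ['\n'] else []) ++ ws ++ c :: pvTailOut rest [] true from by
              simp [pvTailOut, hnl, hwsc]]
          rw [ih.2 hdr]
          simp only [pvLines1, if_neg hnl]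
          rw [pvLines1_shift rest (c :: ws.reverse)]
          simp only [List.reverse_cons, List.reverse_reverse, List.map_cons, pv_join_cons]
          have hrw : ws ++ [c] ++ (pvLines1 rest []).headI = ws ++ c :: (pvLines1 rest []).headI := by
            simp
          rw [hrw, pv_f_head (fun d hd => pvWsNoNl_isspace (hws d hd)) hisp]
          simp
    · intro hdom
      have hdr : ∀ x ∈ rest, pvDomChar x = true := fun x hx => hdom x (List.mem_cons_of_mem _ hx)
      by_cases hnl : c = '\n'
      · subst hnl
        rw [show pvTailOut ('\n'::rest) [] true = '\n' :: pvTailOut rest [] false from by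
              simp [pvTailOut]]
        rw [ih.1 hdr [] (by simp)]
        simp only [pvLines1, if_pos rfl, List.reverse_nil, List.headI, List.tail]
        rw [pv_flatten_sep _ (by simp [pvLines1_ne_nil])]
        simp
      · rw [show pvTailOut (c::rest) [] true = c :: pvTailOut rest [] true from by
              simp [pvTailOut, hnl]]
        rw [ih.2 hdr]
        simp only [pvLines1, if_neg hnl]
        rw [pvLines1_shift rest [c]]
        simp

-- ===== VERDICT (by name: the statement is the Claim_ definition above) =====
theorem format_special_syntax_rules_spec : Claim_equal_format_special_syntax_rules := by
  intro cc hdom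
  have hdom' : ∀ c ∈ cc.toList, pvDomChar c = true := by
    simpa [Dom_format_special_syntax_rules, pvDomStr, List.all_eq_true] using hdom
  have hA : format_special_syntax_rules cc
      = String.ofList (PySem.Chars.join ['\n'] ((PySem.Chars.splitOn cc.toList ['\n']).foldl
          (fun acc line =>
            acc ++ [if PySem.Chars.startswith (PySem.Chars.strip line) ['@'] then '\n' :: line else line]) [])) := rfl
  have hB : format_special_syntax_rules_alt cc
      = String.ofList ((cc.toList.foldl pvStep ([], [], false)).1
          ++ (cc.toList.foldl pvStep ([], [], false)).2.1) := rfl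
  have hm := pv_machine_eq_tailOut cc.toList [] [] false
  simp only [List.nil_append] at hm
  rw [Spec_format_special_syntax_rules, hA, hB, pv_splitOn_eq_lines1,
      PySem.List.foldl_append_singleton_eq_map, hm,
      (pv_main cc.toList).1 hdom' [] (by simp)]
  rfl
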